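-- pv_equiv track=rewrite | github.com/pypi-data/pypi-mirror-317 | packages/xython/xython-3.3.1.tar.gz/xython-3.3.1/src/xython/youtil.py | switch_value_by_2_position_no_in_list_2d
-- ===== SOURCE A (Python) =====
-- def switch_value_by_2_position_no_in_list_2d(input_list_2d, input_no_list):
-- 	"""
-- 	2차원 리스트의 자료에서 각 라인별 2개의 위치를 바꾼는것
-- 	change_position_for_list_2d_by_2_index([[1,2,3], [4,5,6]], [0,2])
-- 	[[1,2,3], [4,5,6]] ==> [[3,2,1], [6,5,4]]
--
-- 	:param input_list_2d: 2차원의 리스트형 자료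
-- 	:param input_no_list:
-- 	"""
-- 	for before, after in input_no_list:
-- 		for no in range(len(input_list_2d)):
-- 			value1 = input_list_2d[no][before]
-- 			value2 = input_list_2d[no][after]
-- 			input_list_2d[no][before] = value2
-- 			input_list_2d[no][after] = value1
-- 	return input_list_2d
-- ===== SOURCE B (Python) =====
-- def switch_value_by_2_position_no_in_list_2d(input_list_2d, input_no_list):
-- 	cache = {}
-- 	for row in input_list_2d:
-- 		n = len(row)
-- 		perm = cache.get(n)
-- 		if perm is None:
-- 			perm = list(range(n))
-- 			for before, after in input_no_list:
-- 				perm[before], perm[after] = perm[after], perm[before]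
-- 			cache[n] = perm
-- 		row[:] = [row[j] for j in perm]
-- 	return input_list_2d
-- ===== Notes on version B (the rewrite author's own statement) =====
-- stated objective: alternative
-- what changed: Instead of re-scanning every row once per (before, after) pair, B composes all pairs into one net permutation per row length (memoised in a dict) and rebuilds each row in a single gather pass.
import Mathlib
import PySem

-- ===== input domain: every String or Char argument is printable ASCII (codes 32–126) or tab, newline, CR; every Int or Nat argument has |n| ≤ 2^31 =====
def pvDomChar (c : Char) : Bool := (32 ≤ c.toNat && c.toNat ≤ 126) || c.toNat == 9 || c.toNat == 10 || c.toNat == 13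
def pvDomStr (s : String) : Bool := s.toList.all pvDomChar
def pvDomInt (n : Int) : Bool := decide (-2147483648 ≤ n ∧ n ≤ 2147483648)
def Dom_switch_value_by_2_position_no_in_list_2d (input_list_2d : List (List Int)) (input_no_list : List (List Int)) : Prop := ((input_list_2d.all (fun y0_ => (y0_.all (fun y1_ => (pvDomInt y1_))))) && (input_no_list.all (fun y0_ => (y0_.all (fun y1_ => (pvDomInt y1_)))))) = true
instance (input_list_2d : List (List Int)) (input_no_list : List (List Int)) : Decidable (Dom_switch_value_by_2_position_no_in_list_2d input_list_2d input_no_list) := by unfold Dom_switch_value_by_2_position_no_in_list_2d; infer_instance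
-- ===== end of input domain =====

-- B composes all (before, after) pairs into one net permutation per row length (memoised by length)
-- and rebuilds each row in a single gather pass; A swaps two columns in every row once per pair.
-- Both Pythons mutate input_list_2d in place the same way; the equivalence proved is about the return value.

-- ===== PORT A =====
-- value1 = row[before]; value2 = row[after]; row[before] = value2; row[after] = value1
def pvSwapA (row : List Int) (before after : Int) : List Int :=
  PySem.List.pySetD
    (PySem.List.pySetD row before (PySem.List.pyGetD row after 0))
    after (PySem.List.pyGetD row before 0)

def switch_value_by_2_position_no_in_list_2d (input_list_2d : List (List Int)) (input_no_list : List (List Int)) : List (List Int) :=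
  input_no_list.foldl (fun m p =>
    match p with
    | [before, after] =>
        (PySem.List.pyRange 0 (PySem.List.len m) 1).foldl
          (fun m no => PySem.List.pySetD m no (pvSwapA (PySem.List.pyGetD m no []) before after)) m
    | _ => m) input_list_2d

-- ===== PORT B =====
-- the net permutation for a row of length n: perm = list(range(n)); swaps applied in order
def pvPermOf (input_no_list : List (List Int)) (n : Int) : List Int :=
  -- 'for before, after in input_no_list': an element that is not a 2-list makes Python raise
  -- (excluded by Pre_); it is rendered as a no-op here.
  input_no_list.foldl (fun perm p =>
    if p.length = 2 then
      let before := PySem.List.pyGetD p 0 0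
      let after := PySem.List.pyGetD p 1 0
      -- perm[before], perm[after] = perm[after], perm[before]
      let rhs : Int × Int := (PySem.List.pyGetD perm after 0, PySem.List.pyGetD perm before 0)
      PySem.List.pySetD (PySem.List.pySetD perm before rhs.1) after rhs.2
    else perm) (PySem.List.pyRange 0 n 1)

-- row[:] = [row[j] for j in perm]
def pvGather (row perm : List Int) : List Int :=
  perm.map (fun j => PySem.List.pyGetD row j 0)

def switch_value_by_2_position_no_in_list_2d_alt (input_list_2d : List (List Int)) (input_no_list : List (List Int)) : List (List Int) :=
  (input_list_2d.foldl (fun (st : PySem.Dict Int (List Int) × List (List Int)) row =>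
    let n := PySem.List.len row
    match st.1.get? n with
    | some perm => (st.1, st.2 ++ [pvGather row perm])
    | none =>
        let perm := pvPermOf input_no_list n
        (st.1.insert n perm, st.2 ++ [pvGather row perm]))
    (PySem.Dict.empty, [])).2

-- ===== PRECONDITION & SPEC =====
-- Pre_ excludes exactly the inputs on which A raises: an element of input_no_list that is not a
-- 2-element list (ValueError on unpacking) or an index out of Python range for some row (IndexError).
def Pre_switch_value_by_2_position_no_in_list_2d (input_list_2d : List (List Int)) (input_no_list : List (List Int)) : Prop :=
  ∀ p ∈ input_no_list, p.length = 2 ∧ ∀ row ∈ input_list_2d, ∀ i ∈ p, PySem.Raise.InRange row.length i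
instance (input_list_2d : List (List Int)) (input_no_list : List (List Int)) : Decidable (Pre_switch_value_by_2_position_no_in_list_2d input_list_2d input_no_list) := by unfold Pre_switch_value_by_2_position_no_in_list_2d; infer_instance

def pvWitness_switch_value_by_2_position_no_in_list_2d : List (List Int) × List (List Int) := ([[1, 2, 3], [4, 5, 6]], [[0, 2]])

def Spec_switch_value_by_2_position_no_in_list_2d (input_list_2d : List (List Int)) (input_no_list : List (List Int)) (out : List (List Int)) : Prop := out = switch_value_by_2_position_no_in_list_2d_alt input_list_2d input_no_list
instance (input_list_2d : List (List Int)) (input_no_list : List (List Int)) (out : List (List Int)) : Decidable (Spec_switch_value_by_2_position_no_in_list_2d input_list_2d input_no_list out) := by unfold Spec_switch_value_by_2_position_no_in_list_2d; infer_instance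

-- ===== CLAIM (what is proved, stated in full; the proofs are below) =====
def Claim_equal_switch_value_by_2_position_no_in_list_2d : Prop := ∀ (input_list_2d : List (List Int)) (input_no_list : List (List Int)), Dom_switch_value_by_2_position_no_in_list_2d input_list_2d input_no_list → Pre_switch_value_by_2_position_no_in_list_2d input_list_2d input_no_list → Spec_switch_value_by_2_position_no_in_list_2d input_list_2d input_no_list (switch_value_by_2_position_no_in_list_2d input_list_2d input_no_list)

-- ===== LEMMAS AND PROOFS =====

-- proof-side name for the tuple-assignment swap inside pvPermOf (definitionally equal to its arm)
def pvSwapB (perm : List Int) (before after : Int) : List Int :=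
  PySem.List.pySetD
    (PySem.List.pySetD perm before (PySem.List.pyGetD perm after 0))
    after (PySem.List.pyGetD perm before 0)

lemma pvPermOf_eq (ps : List (List Int)) (n : Int) :
    pvPermOf ps n = ps.foldl (fun perm p =>
      if p.length = 2 then pvSwapB perm (PySem.List.pyGetD p 0 0) (PySem.List.pyGetD p 1 0)
      else perm) (PySem.List.pyRange 0 n 1) := rfl

-- the per-row value computed by A over the whole pair list
def pvRowA (input_no_list : List (List Int)) (row : List Int) : List Int :=
  input_no_list.foldl (fun r p =>
    match p with
    | [before, after] => pvSwapA r before after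
    | _ => r) row

lemma pyIdx_of_inRange (n : Nat) (i : Int) (h : PySem.Raise.InRange n i) :
    ∃ k, PySem.List.pyIdx? n i = some k ∧ k < n := by
  obtain ⟨h1, h2⟩ := h
  unfold PySem.List.pyIdx?
  by_cases h0 : 0 ≤ i
  · rw [if_pos h0, if_pos h2]
    exact ⟨i.toNat, rfl, by omega⟩
  · rw [if_neg h0, if_pos h1]
    exact ⟨n - (-i).toNat, rfl, by omega⟩

lemma pyGetD_map_inRange {α β : Type} (f : α → β) (xs : List α) (i : Int) (d : β) (d' : α)
    (h : PySem.Raise.InRange xs.length i) :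
    PySem.List.pyGetD (xs.map f) i d = f (PySem.List.pyGetD xs i d') := by
  obtain ⟨k, hk, hlt⟩ := pyIdx_of_inRange xs.length i h
  simp [PySem.List.pyGetD, PySem.List.pyGet?, hk, List.getElem?_eq_getElem hlt]

lemma pySetD_map {α β : Type} (f : α → β) (xs : List α) (i : Int) (v : α) :
    PySem.List.pySetD (xs.map f) i (f v) = (PySem.List.pySetD xs i v).map f := by
  simp only [PySem.List.pySetD, PySem.List.pySet?, List.length_map]
  cases PySem.List.pyIdx? xs.length i <;> simp

lemma length_pvSwapB (perm : List Int) (b a : Int) : (pvSwapB perm b a).length = perm.length := by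
  simp [pvSwapB, PySem.List.length_pySetD]

lemma swapA_map (g : Int → Int) (perm : List Int) (b a : Int)
    (hb : PySem.Raise.InRange perm.length b) (ha : PySem.Raise.InRange perm.length a) :
    pvSwapA (perm.map g) b a = (pvSwapB perm b a).map g := by
  unfold pvSwapA pvSwapB
  rw [pyGetD_map_inRange g perm b 0 0 hb, pyGetD_map_inRange g perm a 0 0 ha,
      pySetD_map, pySetD_map]

lemma fold_gather (row : List Int) (ps : List (List Int)) :
    ∀ (perm : List Int), perm.length = row.length →
    (∀ p ∈ ps, p.length = 2 ∧ ∀ i ∈ p, PySem.Raise.InRange row.length i) →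
    pvRowA ps (perm.map (fun j => PySem.List.pyGetD row j 0)) =
      (ps.foldl (fun perm p =>
        if p.length = 2 then pvSwapB perm (PySem.List.pyGetD p 0 0) (PySem.List.pyGetD p 1 0)
        else perm) perm).map (fun j => PySem.List.pyGetD row j 0) := by
  induction ps with
  | nil => intro perm _ _; rfl
  | cons p t ih =>
    intro perm hlen hv
    obtain ⟨hp2, hpin⟩ := hv p (List.mem_cons_self)
    match p, hp2 with
    | [b, a], _ =>
      have hb : PySem.Raise.InRange perm.length b := by
        rw [hlen]; exact hpin b (by simp)
      have ha : PySem.Raise.InRange perm.length a := by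
        rw [hlen]; exact hpin a (by simp)
      simp only [pvRowA, List.foldl_cons, List.length_cons, List.length_nil]
      have h0 : PySem.List.pyGetD [b, a] (0:Int) 0 = b := rfl
      have h1 : PySem.List.pyGetD [b, a] (1:Int) 0 = a := rfl
      rw [h0, h1, swapA_map _ _ _ _ hb ha]
      exact ih (pvSwapB perm b a) (by rw [length_pvSwapB, hlen])
        (fun q hq => hv q (List.mem_cons_of_mem _ hq))

lemma foldl_set_map_nat {α : Type} (f : α → α) (d : α) :
    ∀ (l pref : List α),
    (List.range' pref.length l.length).foldl
      (fun m no => m.set no (f (m.getD no d))) (pref ++ l) = pref ++ l.map f := by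
  intro l
  induction l with
  | nil => intro pref; simp
  | cons x t ih =>
    intro pref
    rw [List.length_cons, List.range'_succ, List.foldl_cons]
    have hget : (pref ++ x :: t).getD pref.length d = x := by
      simp [List.getD]
    have hset : (pref ++ x :: t).set pref.length (f x) = (pref ++ [f x]) ++ t := by
      rw [List.set_append_right _ _ (Nat.le_refl pref.length)]
      simp
    rw [hget, hset]
    have := ih (pref ++ [f x])
    simp only [List.length_append, List.length_cons, List.length_nil] at this ⊢
    rw [show pref.length + 1 = pref.length + 1 + 0 from rfl] at this
    simpa using this

lemma foldl_set_map {α : Type} (f : α → α) (d : α) (m : List α) :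
    (PySem.List.pyRange 0 (PySem.List.len m) 1).foldl
      (fun m no => PySem.List.pySetD m no (f (PySem.List.pyGetD m no d))) m = m.map f := by
  rw [PySem.List.len_eq, PySem.List.pyRange_zero_natCast, List.foldl_map]
  have h := foldl_set_map_nat f d m []
  simp only [List.nil_append, List.length_nil, ← List.range_eq_range'] at h
  rw [← h]
  have hfun : (fun (m' : List α) (k : Nat) => PySem.List.pySetD m' (↑k) (f (PySem.List.pyGetD m' (↑k) d)))
      = fun m' k => m'.set k (f (m'.getD k d)) := by
    funext m' k
    simp [PySem.List.pySetD_natCast, PySem.List.pyGetD_natCast]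
  rw [hfun]

lemma A_eq_map (ps : List (List Int)) :
    ∀ (ls : List (List Int)), (∀ p ∈ ps, p.length = 2) →
    switch_value_by_2_position_no_in_list_2d ls ps = ls.map (pvRowA ps) := by
  induction ps with
  | nil => intro ls _; exact (List.map_id ls).symm
  | cons p t ih =>
    intro ls hv
    have hp2 := hv p (List.mem_cons_self)
    match p, hp2 with
    | [b, a], _ =>
      simp only [switch_value_by_2_position_no_in_list_2d, List.foldl_cons]
      rw [foldl_set_map (fun row => pvSwapA row b a) [] ls]
      have := ih (ls.map (fun row => pvSwapA row b a))
        (fun q hq => hv q (List.mem_cons_of_mem _ hq))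
      simp only [switch_value_by_2_position_no_in_list_2d] at this
      rw [this, List.map_map]
      rfl

-- B's memoising fold returns exactly the per-row gather of the length-indexed permutation
lemma B_eq_map (ps : List (List Int)) :
    ∀ (ls : List (List Int)) (cache : PySem.Dict Int (List Int)) (acc : List (List Int)),
    (∀ n perm, cache.get? n = some perm → perm = pvPermOf ps n) →
    (ls.foldl (fun (st : PySem.Dict Int (List Int) × List (List Int)) row =>
      let n := PySem.List.len row
      match st.1.get? n with
      | some perm => (st.1, st.2 ++ [pvGather row perm])
      | none =>
          let perm := pvPermOf ps n
          (st.1.insert n perm, st.2 ++ [pvGather row perm]))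
      (cache, acc)).2 = acc ++ ls.map (fun row => pvGather row (pvPermOf ps (PySem.List.len row))) := by
  intro ls
  induction ls with
  | nil => intro cache acc _; simp
  | cons row t ih =>
    intro cache acc hc
    simp only [List.foldl_cons, List.map_cons]
    cases hget : cache.get? (PySem.List.len row) with
    | some perm =>
      rw [ih cache _ hc, hc _ _ hget]
      simp
    | none =>
      rw [ih _ _ ?_]
      · simp
      · intro n perm hn
        by_cases hne : n = PySem.List.len row
        · subst hne
          rw [PySem.Dict.get?_insert_self] at hn
          exact (Option.some.injEq _ _ ▸ hn).symm
        · rw [PySem.Dict.get?_insert_of_ne _ _ hne] at hn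
          exact hc _ _ hn

lemma row_eq (ps : List (List Int)) (row : List Int)
    (hv : ∀ p ∈ ps, p.length = 2 ∧ ∀ i ∈ p, PySem.Raise.InRange row.length i) :
    pvRowA ps row = pvGather row (pvPermOf ps (PySem.List.len row)) := by
  have hmap : (PySem.List.pyRange 0 (PySem.List.len row) 1).map
      (fun j => PySem.List.pyGetD row j 0) = row := PySem.List.map_pyGetD_pyRange_zero row 0
  have hlen : (PySem.List.pyRange 0 (PySem.List.len row) 1).length = row.length := by
    conv_rhs => rw [← hmap]
    simp
  have := fold_gather row ps (PySem.List.pyRange 0 (PySem.List.len row) 1) hlen hv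
  rw [hmap] at this
  rw [pvGather, pvPermOf_eq]
  exact this

-- ===== VERDICT (by name: the statement is the Claim_ definition above) =====
theorem switch_value_by_2_position_no_in_list_2d_spec : Claim_equal_switch_value_by_2_position_no_in_list_2d := by
  intro ls ps _ hpre
  unfold Spec_switch_value_by_2_position_no_in_list_2d
  rw [A_eq_map ps ls (fun p hp => (hpre p hp).1)]
  unfold switch_value_by_2_position_no_in_list_2d_alt
  rw [B_eq_map ps ls PySem.Dict.empty [] (by intro n perm h; rw [PySem.Dict.get?_empty] at h; cases h)]
  simp only [List.nil_append]
  apply List.map_congr_left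
  intro row hrow
  exact row_eq ps row (fun p hp => ⟨(hpre p hp).1, fun i hi => (hpre p hp).2 row hrow i hi⟩)
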